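-- pv_equiv track=rewrite | github.com/anishyathinesh/language-classifier | features.py | common_subs_3
-- ===== SOURCE A (Python) =====
-- def common_subs_3(str):
--     phrases = [
--     "in de buurt",
--     "het is een",
--     "op de hoogte",
--     "in het algemeen",
--     "dat wegens zijn",
--     "was van de"
--     ]
--     str = str.split()
--     len3 = []
--     for i in range(len(str)-2):
--         len3.append(' '.join(str[i:i+3]))
--     for p in phrases:
--         if p in len3:
--             return True
--     return False
-- ===== SOURCE B (Python) =====
-- # Padded substring search: normalize whitespace once, then look for each phrase
-- # with space guards in the padded text; no trigram list is ever built.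
-- def common_subs_3(str):
--     phrases = [
--         "in de buurt",
--         "het is een",
--         "op de hoogte",
--         "in het algemeen",
--         "dat wegens zijn",
--         "was van de",
--     ]
--     padded = ' ' + ' '.join(str.split()) + ' '
--     return any(' ' + p + ' ' in padded for p in phrases)
-- ===== Notes on version B (the rewrite author's own statement) =====
-- stated objective: alternative
-- what changed: Instead of building the list of all word-trigram strings and scanning it per phrase, B normalizes whitespace once and tests each phrase by substring search of the space-padded phrase inside the space-padded normalized text; the padding spaces make the substring occurrences exactly the word-aligned trigram occurrences, so no n-gram list is built at all.
import Mathlib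
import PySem

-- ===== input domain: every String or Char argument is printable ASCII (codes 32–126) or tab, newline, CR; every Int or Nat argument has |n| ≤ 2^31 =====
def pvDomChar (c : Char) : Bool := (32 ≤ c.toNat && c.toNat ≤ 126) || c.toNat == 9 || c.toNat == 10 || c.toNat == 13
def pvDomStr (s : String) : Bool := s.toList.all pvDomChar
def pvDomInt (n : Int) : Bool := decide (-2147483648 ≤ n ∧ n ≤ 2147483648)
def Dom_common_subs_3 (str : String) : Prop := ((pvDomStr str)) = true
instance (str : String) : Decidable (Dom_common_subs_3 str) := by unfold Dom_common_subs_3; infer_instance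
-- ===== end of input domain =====

-- B replaces A's build-all-trigram-strings-then-scan-each-phrase with a padded
-- substring search over the whitespace-normalized text (no n-gram list is built);
-- objective: alternative algorithm, same asymptotic cost.

-- ===== PORT A =====
def phrasesA : List String :=
  ["in de buurt", "het is een", "op de hoogte", "in het algemeen",
   "dat wegens zijn", "was van de"]

def common_subs_3 (str : String) : Bool :=
  let w := PySem.Str.split₀ str
  let len3 := (PySem.List.pyRange 0 ((w.length : Int) - 2)).foldl
    (fun acc i => acc ++ [PySem.Str.join " " (PySem.List.slice w (some i) (some (i + 3)))]) []
  phrasesA.any (fun p => len3.contains p)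

-- ===== PORT B =====
def phrasesB : List String :=
  ["in de buurt", "het is een", "op de hoogte", "in het algemeen",
   "dat wegens zijn", "was van de"]

def common_subs_3_alt (str : String) : Bool :=
  let padded := " " ++ PySem.Str.join " " (PySem.Str.split₀ str) ++ " "
  phrasesB.any (fun p => PySem.Str.isIn (" " ++ p ++ " ") padded)

-- ===== PRECONDITION & SPEC =====
def Spec_common_subs_3 (str : String) (out : Bool) : Prop := out = common_subs_3_alt str
instance (str : String) (out : Bool) : Decidable (Spec_common_subs_3 str out) := by unfold Spec_common_subs_3; infer_instance

-- ===== CLAIM (what is proved, stated in full; the proofs are below) =====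
def Claim_equal_common_subs_3 : Prop := ∀ (str : String), Dom_common_subs_3 str → Spec_common_subs_3 str (common_subs_3 str)

-- ===== LEMMAS AND PROOFS =====

-- proof-side triple form of the six phrases
def trigramsB : List (String × String × String) :=
  [("in", "de", "buurt"), ("het", "is", "een"), ("op", "de", "hoogte"),
   ("in", "het", "algemeen"), ("dat", "wegens", "zijn"), ("was", "van", "de")]

-- each word followed by one space, flattened
def padWords (W : List (List Char)) : List Char :=
  (W.map (fun a => a ++ [' '])).flatten

-- ---------- split₀ emits space-free words ----------
theorem go_inv (s : List Char) : ∀ (cur : List Char) (acc : List (List Char)),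
    (∀ c ∈ cur, PySem.Chars.isspace c = false) →
    (∀ cs ∈ acc, ∀ c ∈ cs, PySem.Chars.isspace c = false) →
    ∀ cs ∈ PySem.Chars.split₀.go s cur acc, ∀ c ∈ cs, PySem.Chars.isspace c = false := by
  induction s with
  | nil =>
    intro cur acc hcur hacc cs hcs
    simp only [PySem.Chars.split₀.go] at hcs
    split at hcs
    · exact hacc cs (List.mem_reverse.mp hcs)
    · rcases List.mem_cons.mp (List.mem_reverse.mp hcs) with h | h
      · exact fun c hc => hcur c (List.mem_reverse.mp (h ▸ hc))
      · exact hacc cs h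
  | cons c rest ih =>
    intro cur acc hcur hacc cs hcs
    simp only [PySem.Chars.split₀.go] at hcs
    split at hcs
    · split at hcs
      · exact ih [] acc (by simp) hacc cs hcs
      · refine ih [] (cur.reverse :: acc) (by simp) ?_ cs hcs
        intro ds hds
        rcases List.mem_cons.mp hds with h | h
        · exact fun d hd => hcur d (List.mem_reverse.mp (h ▸ hd))
        · exact hacc ds h
    · refine ih (c :: cur) acc ?_ hacc cs hcs
      intro d hd
      rcases List.mem_cons.mp hd with h | h
      · next hns => subst h; simpa using hns
      · exact hcur d h

theorem no_space_str (s : String) :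
    ∀ x ∈ PySem.Str.split₀ s, ' ' ∉ x.toList := by
  intro x hx hsp
  simp only [PySem.Str.split₀, List.mem_map] at hx
  obtain ⟨cs, hcs, rfl⟩ := hx
  rw [String.toList_ofList] at hsp
  have h := go_inv s.toList [] [] (by simp) (by simp) cs
    (by simpa [PySem.Chars.split₀] using hcs) ' ' hsp
  exact absurd h (by decide)

-- ---------- unique parsing of space-separated space-free blocks ----------
theorem append_space_inj (as bs t u : List Char) (ha : ' ' ∉ as) (hb : ' ' ∉ bs)
    (h : as ++ ' ' :: t = bs ++ ' ' :: u) : as = bs ∧ t = u := by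
  induction as generalizing bs with
  | nil =>
    cases bs with
    | nil => simpa using h
    | cons b bs' =>
      simp only [List.nil_append, List.cons_append, List.cons.injEq] at h
      exact absurd (h.1 ▸ List.mem_cons_self) hb
  | cons a as' ih =>
    cases bs with
    | nil =>
      simp only [List.cons_append, List.nil_append, List.cons.injEq] at h
      exact absurd (h.1 ▸ List.mem_cons_self) ha
    | cons b bs' =>
      simp only [List.cons_append, List.cons.injEq] at h
      have := ih bs' (fun hm => ha (List.mem_cons_of_mem _ hm))
        (fun hm => hb (List.mem_cons_of_mem _ hm)) h.2
      exact ⟨by rw [h.1, this.1], this.2⟩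

theorem split_at_space (a : List Char) (ha : ' ' ∉ a) :
    ∀ (u q t : List Char), u ++ ' ' :: q = a ++ ' ' :: t →
      (u = a ∧ q = t) ∨ ∃ u', u = a ++ ' ' :: u' ∧ u' ++ ' ' :: q = t := by
  induction a with
  | nil =>
    intro u q t h
    cases u with
    | nil => left; simpa using h
    | cons d u' =>
      simp only [List.cons_append, List.nil_append, List.cons.injEq] at h
      right; exact ⟨u', by simp [h.1], h.2⟩
  | cons e a' ih =>
    intro u q t h
    cases u with
    | nil =>
      simp only [List.nil_append, List.cons_append, List.cons.injEq] at h
      exact absurd (h.1 ▸ List.mem_cons_self) ha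
    | cons d u' =>
      simp only [List.cons_append, List.cons.injEq] at h
      rcases ih (fun hm => ha (List.mem_cons_of_mem _ hm)) u' q t h.2 with ⟨h1, h2⟩ | ⟨u'', h1, h2⟩
      · left; exact ⟨by rw [h.1, h1], h2⟩
      · right; exact ⟨u'', by rw [h.1, h1]; rfl, h2⟩

-- ---------- padWords facts ----------
theorem padWords_append (l m : List (List Char)) :
    padWords (l ++ m) = padWords l ++ padWords m := by
  simp [padWords]

theorem join_sp (a : List Char) (W : List (List Char)) :
    PySem.Chars.join [' '] (a :: W) ++ [' '] = padWords (a :: W) := by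
  induction W generalizing a with
  | nil => simp [padWords, PySem.Chars.join_singleton]
  | cons b W' ih =>
    have h2 : PySem.Chars.join [' '] (a :: b :: W') ++ [' ']
        = a ++ [' '] ++ (PySem.Chars.join [' '] (b :: W') ++ [' ']) := by
      rw [PySem.Chars.join_cons_cons]; simp
    rw [h2, ih b]; simp [padWords]

theorem padWords_ends_space (l : List (List Char)) (hl : l ≠ []) :
    ∃ m, padWords l = m ++ [' '] := by
  induction l with
  | nil => exact absurd rfl hl
  | cons a l' ih =>
    cases l' with
    | nil => exact ⟨a, by simp [padWords]⟩
    | cons b l'' =>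
      obtain ⟨m', hm'⟩ := ih (by simp)
      exact ⟨a ++ [' '] ++ m', by simp [padWords] at hm' ⊢; simp [hm']⟩

-- ---------- prefix occurrences are word-aligned ----------
theorem prefixK (P : List (List Char)) (hP : ∀ p ∈ P, ' ' ∉ p) :
    ∀ (W : List (List Char)), (∀ a ∈ W, ' ' ∉ a) →
    ∀ v, padWords W = padWords P ++ v → ∃ r, W = P ++ r ∧ v = padWords r := by
  induction P with
  | nil =>
    intro W _ v h
    exact ⟨W, rfl, by simpa [padWords] using h.symm⟩
  | cons p P' ih =>
    intro W hW v h
    cases W with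
    | nil =>
      exfalso
      have := congrArg List.length h
      simp [padWords] at this
    | cons a W' =>
      have h' : a ++ ' ' :: padWords W' = p ++ ' ' :: (padWords P' ++ v) := by
        simpa [padWords, List.append_assoc] using h
      obtain ⟨h1, h2⟩ := append_space_inj a p _ _ (hW a (by simp)) (hP p (by simp)) h'
      obtain ⟨r, hr1, hr2⟩ := ih (fun q hq => hP q (by simp [hq])) W'
        (fun b hb => hW b (by simp [hb])) v h2
      exact ⟨r, by simp [h1, hr1], hr2⟩

-- ---------- any occurrence of a padded pattern is word-aligned ----------
theorem occK (P : List (List Char)) (hP : ∀ p ∈ P, ' ' ∉ p) (hPne : P ≠ []) :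
    ∀ (W : List (List Char)), (∀ a ∈ W, ' ' ∉ a) →
    ∀ u v, ' ' :: padWords W = u ++ (' ' :: padWords P) ++ v →
    ∃ l r, W = l ++ P ++ r := by
  intro W
  induction W with
  | nil =>
    intro _ u v h
    exfalso
    cases P with
    | nil => exact hPne rfl
    | cons p P' =>
      have := congrArg List.length h
      simp [padWords] at this
      omega
  | cons a W' ih =>
    intro hW u v h
    cases u with
    | nil =>
      simp only [List.nil_append, List.cons_append, List.cons.injEq] at h
      obtain ⟨r, hr, _⟩ := prefixK P hP (a :: W') hW v h.2
      exact ⟨[], r, by simpa using hr⟩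
    | cons u0 u' =>
      simp only [List.cons_append, List.cons.injEq] at h
      have h' : u' ++ ' ' :: (padWords P ++ v) = a ++ ' ' :: padWords W' := by
        simpa [padWords, List.append_assoc] using h.2.symm
      rcases split_at_space a (hW a (by simp)) u' _ _ h' with ⟨_, h2⟩ | ⟨u'', _, h2⟩
      · obtain ⟨r, hr, _⟩ := prefixK P hP W' (fun b hb => hW b (by simp [hb])) v h2.symm
        exact ⟨[a], r, by simp [hr]⟩
      · obtain ⟨l, r, hlr⟩ := ih (fun b hb => hW b (by simp [hb])) (' ' :: u'') v
          (by simp [← h2, List.append_assoc])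
        exact ⟨a :: l, r, by simp [hlr]⟩

-- ---------- word-aligned windows give occurrences ----------
theorem window_occ (P W l r : List (List Char)) (hW : W = l ++ P ++ r) :
    ∃ u v, ' ' :: padWords W = u ++ (' ' :: padWords P) ++ v := by
  subst hW
  rw [padWords_append, padWords_append]
  cases l with
  | nil => exact ⟨[], padWords r, by simp [padWords]⟩
  | cons a l' =>
    obtain ⟨m, hm⟩ := padWords_ends_space (a :: l') (by simp)
    exact ⟨' ' :: m, padWords r, by simp [hm, List.append_assoc]⟩

-- ---------- windows ↔ indexed triples ----------
theorem window_iff {α : Type} (w : List α) (x y z : α) :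
    (∃ l r, w = l ++ [x, y, z] ++ r) ↔
      ∃ i : Nat, ∃ h : i + 2 < w.length, w[i] = x ∧ w[i+1] = y ∧ w[i+2] = z := by
  constructor
  · rintro ⟨l, r, rfl⟩
    induction l with
    | nil => refine ⟨0, by simp, ?_, ?_, ?_⟩ <;> simp
    | cons a l ih =>
      obtain ⟨i, hi, h1, h2, h3⟩ := ih
      refine ⟨i + 1, by simp at hi ⊢; omega, ?_, ?_, ?_⟩
      · simpa only [List.cons_append, List.getElem_cons_succ] using h1
      · simpa only [List.cons_append, List.getElem_cons_succ] using h2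
      · simpa only [List.cons_append, List.getElem_cons_succ] using h3
  · rintro ⟨i, h, hx, hy, hz⟩
    refine ⟨w.take i, w.drop (i + 3), ?_⟩
    conv_lhs => rw [← List.take_append_drop i w]
    rw [List.drop_eq_getElem_cons (by omega), List.drop_eq_getElem_cons (by omega),
        List.drop_eq_getElem_cons (by omega)]
    simp [hx, hy, hz]

-- ---------- joined trigram equality vs triple equality (A side) ----------
theorem toList_join3 (x y z : String) :
    (PySem.Str.join " " [x, y, z]).toList = x.toList ++ ' ' :: (y.toList ++ ' ' :: z.toList) := by
  simp [PySem.Str.toList_join, PySem.Chars.join_cons_cons, PySem.Chars.join_singleton]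

theorem join3_eq_iff (x y z a b c : String)
    (hx : ' ' ∉ x.toList) (hy : ' ' ∉ y.toList)
    (ha : ' ' ∉ a.toList) (hb : ' ' ∉ b.toList) :
    (PySem.Str.join " " [x, y, z] = PySem.Str.join " " [a, b, c]) ↔ (x = a ∧ y = b ∧ z = c) := by
  constructor
  · intro h
    rw [← String.toList_inj, toList_join3, toList_join3] at h
    obtain ⟨h1, h2⟩ := append_space_inj _ _ _ _ hx ha h
    obtain ⟨h3, h4⟩ := append_space_inj _ _ _ _ hy hb h2
    exact ⟨String.toList_inj.mp h1, String.toList_inj.mp h3, String.toList_inj.mp h4⟩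
  · rintro ⟨rfl, rfl, rfl⟩; rfl

theorem bridge (x y z : String) (hx : ' ' ∉ x.toList) (hy : ' ' ∉ y.toList) :
    (PySem.Str.join " " [x, y, z] ∈ phrasesA) ↔ ((x, y, z) ∈ trigramsB) := by
  have h1 : ("in de buurt" : String) = PySem.Str.join " " ["in", "de", "buurt"] := rfl
  have h2 : ("het is een" : String) = PySem.Str.join " " ["het", "is", "een"] := rfl
  have h3 : ("op de hoogte" : String) = PySem.Str.join " " ["op", "de", "hoogte"] := rfl
  have h4 : ("in het algemeen" : String) = PySem.Str.join " " ["in", "het", "algemeen"] := rfl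
  have h5 : ("dat wegens zijn" : String) = PySem.Str.join " " ["dat", "wegens", "zijn"] := rfl
  have h6 : ("was van de" : String) = PySem.Str.join " " ["was", "van", "de"] := rfl
  simp only [phrasesA, trigramsB, List.mem_cons, List.not_mem_nil, or_false, Prod.mk.injEq]
  rw [h1, h2, h3, h4, h5, h6]
  rw [join3_eq_iff x y z _ _ _ hx hy (by decide) (by decide),
      join3_eq_iff x y z _ _ _ hx hy (by decide) (by decide),
      join3_eq_iff x y z _ _ _ hx hy (by decide) (by decide),
      join3_eq_iff x y z _ _ _ hx hy (by decide) (by decide),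
      join3_eq_iff x y z _ _ _ hx hy (by decide) (by decide),
      join3_eq_iff x y z _ _ _ hx hy (by decide) (by decide)]

theorem slice3 (w : List String) (i : Nat) (h : i + 2 < w.length) :
    PySem.List.slice w (some (i : Int)) (some ((i : Int) + 3))
      = [w[i], w[i + 1], w[i + 2]] := by
  have hc : ((i : Int) + 3) = ((i + 3 : Nat) : Int) := by push_cast; ring
  rw [hc, PySem.List.slice_natCast]
  have h1 : i < w.length := by omega
  have h2 : i + 1 < w.length := by omega
  rw [List.drop_eq_getElem_cons h1, List.drop_eq_getElem_cons h2,
      List.drop_eq_getElem_cons h]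
  have h3 : i + 3 - i = 3 := by omega
  rw [h3]
  rfl

-- A returns true iff some aligned word triple joins to a phrase
theorem A_iff (str : String) :
    common_subs_3 str = true ↔
      ∃ i : Nat, ∃ h : i + 2 < (PySem.Str.split₀ str).length,
        PySem.Str.join " " [(PySem.Str.split₀ str)[i], (PySem.Str.split₀ str)[i+1],
          (PySem.Str.split₀ str)[i+2]] ∈ phrasesA := by
  simp only [common_subs_3, PySem.List.foldl_append_singleton_eq_map, List.nil_append,
    List.any_eq_true, List.contains_iff_mem, List.mem_map]
  constructor
  · rintro ⟨p, hp, j, hj, rfl⟩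
    obtain ⟨h0, hlt⟩ := PySem.List.mem_pyRange_one.mp hj
    lift j to Nat using h0 with i
    have hi : i + 2 < (PySem.Str.split₀ str).length := by omega
    rw [slice3 _ i hi] at hp
    exact ⟨i, hi, hp⟩
  · rintro ⟨i, hi, hm⟩
    refine ⟨_, hm, (i : Int), PySem.List.mem_pyRange_one.mpr ⟨by positivity, by omega⟩, ?_⟩
    rw [slice3 _ i hi]

-- padded pattern occurs as infix iff the triple occurs as a word-aligned window
theorem pad_infix_iff (W : List (List Char)) (hW : ∀ a ∈ W, ' ' ∉ a)
    (x y z : List Char) (hx : ' ' ∉ x) (hy : ' ' ∉ y) (hz : ' ' ∉ z) :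
    ((' ' :: padWords [x, y, z]) <:+: (' ' :: padWords W)) ↔ ∃ l r, W = l ++ [x, y, z] ++ r := by
  constructor
  · rintro ⟨u, v, h⟩
    exact occK [x, y, z] (by simp [hx, hy, hz]) (by simp) W hW u v
      (by rw [← h])
  · rintro ⟨l, r, hlr⟩
    obtain ⟨u, v, h⟩ := window_occ [x, y, z] W l r hlr
    exact ⟨u, v, h.symm⟩

-- the padded-substring test equals existence of an indexed word triple
theorem patt_iff (w : List String) (hw : ∀ a ∈ w, ' ' ∉ a.toList) (sx sy sz : String)
    (hx : ' ' ∉ sx.toList) (hy : ' ' ∉ sy.toList) (hz : ' ' ∉ sz.toList) :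
    PySem.Str.isIn (" " ++ PySem.Str.join " " [sx, sy, sz] ++ " ")
        (" " ++ PySem.Str.join " " w ++ " ") = true
      ↔ ∃ i : Nat, ∃ h : i + 2 < w.length, w[i] = sx ∧ w[i+1] = sy ∧ w[i+2] = sz := by
  rw [PySem.Str.isIn_iff_infix]
  have e1 : (" " ++ PySem.Str.join " " [sx, sy, sz] ++ " ").toList
      = ' ' :: padWords [sx.toList, sy.toList, sz.toList] := by
    rw [String.toList_append, String.toList_append, PySem.Str.toList_join, ← join_sp]
    simp
  rw [e1]
  cases w with
  | nil =>
    constructor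
    · intro h
      exfalso
      have := h.length_le
      simp [padWords] at this
      omega
    · rintro ⟨i, h, -⟩
      simp at h
  | cons a w' =>
    have e2 : (" " ++ PySem.Str.join " " (a :: w') ++ " ").toList
        = ' ' :: padWords ((a :: w').map String.toList) := by
      rw [String.toList_append, String.toList_append, PySem.Str.toList_join, List.map_cons,
          ← join_sp]
      simp
    have hWc : ∀ b ∈ (a :: w').map String.toList, ' ' ∉ b := by
      intro b hb
      simp only [List.mem_map] at hb
      obtain ⟨c, hc, rfl⟩ := hb
      exact hw c hc
    rw [e2, pad_infix_iff _ hWc _ _ _ hx hy hz, window_iff]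
    constructor
    · rintro ⟨i, h, h1, h2, h3⟩
      rw [List.length_map] at h
      rw [List.getElem_map] at h1 h2 h3
      exact ⟨i, h, String.toList_inj.mp h1, String.toList_inj.mp h2, String.toList_inj.mp h3⟩
    · rintro ⟨i, h, h1, h2, h3⟩
      exact ⟨i, by simpa using h, by simp only [List.getElem_map]; rw [h1], by simp only [List.getElem_map]; rw [h2], by simp only [List.getElem_map]; rw [h3]⟩

-- B returns true iff some aligned word triple is one of the phrase triples
set_option maxHeartbeats 2000000 in
theorem B_iff (str : String) :
    common_subs_3_alt str = true ↔
      ∃ i : Nat, ∃ h : i + 2 < (PySem.Str.split₀ str).length,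
        ((PySem.Str.split₀ str)[i], (PySem.Str.split₀ str)[i+1],
          (PySem.Str.split₀ str)[i+2]) ∈ trigramsB := by
  have hw := no_space_str str
  have h1 : ("in de buurt" : String) = PySem.Str.join " " ["in", "de", "buurt"] := rfl
  have h2 : ("het is een" : String) = PySem.Str.join " " ["het", "is", "een"] := rfl
  have h3 : ("op de hoogte" : String) = PySem.Str.join " " ["op", "de", "hoogte"] := rfl
  have h4 : ("in het algemeen" : String) = PySem.Str.join " " ["in", "het", "algemeen"] := rfl
  have h5 : ("dat wegens zijn" : String) = PySem.Str.join " " ["dat", "wegens", "zijn"] := rfl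
  have h6 : ("was van de" : String) = PySem.Str.join " " ["was", "van", "de"] := rfl
  simp only [common_subs_3_alt, phrasesB, List.any_cons, List.any_nil, Bool.or_eq_true,
    Bool.false_eq_true, or_false]
  rw [h1, h2, h3, h4, h5, h6,
      patt_iff _ hw _ _ _ (by decide) (by decide) (by decide),
      patt_iff _ hw _ _ _ (by decide) (by decide) (by decide),
      patt_iff _ hw _ _ _ (by decide) (by decide) (by decide),
      patt_iff _ hw _ _ _ (by decide) (by decide) (by decide),
      patt_iff _ hw _ _ _ (by decide) (by decide) (by decide),
      patt_iff _ hw _ _ _ (by decide) (by decide) (by decide)]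
  simp only [trigramsB, List.mem_cons, List.not_mem_nil, or_false, Prod.mk.injEq]
  constructor
  · rintro (⟨i,h,p⟩|⟨i,h,p⟩|⟨i,h,p⟩|⟨i,h,p⟩|⟨i,h,p⟩|⟨i,h,p⟩)
    · exact ⟨i, h, Or.inl p⟩
    · exact ⟨i, h, Or.inr (Or.inl p)⟩
    · exact ⟨i, h, Or.inr (Or.inr (Or.inl p))⟩
    · exact ⟨i, h, Or.inr (Or.inr (Or.inr (Or.inl p)))⟩
    · exact ⟨i, h, Or.inr (Or.inr (Or.inr (Or.inr (Or.inl p))))⟩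
    · exact ⟨i, h, Or.inr (Or.inr (Or.inr (Or.inr (Or.inr p))))⟩
  · rintro ⟨i, h, p⟩
    rcases p with ⟨e1,e2,e3⟩|⟨e1,e2,e3⟩|⟨e1,e2,e3⟩|⟨e1,e2,e3⟩|⟨e1,e2,e3⟩|⟨e1,e2,e3⟩
    · exact Or.inl ⟨i, h, e1, e2, e3⟩
    · exact Or.inr (Or.inl ⟨i, h, e1, e2, e3⟩)
    · exact Or.inr (Or.inr (Or.inl ⟨i, h, e1, e2, e3⟩))
    · exact Or.inr (Or.inr (Or.inr (Or.inl ⟨i, h, e1, e2, e3⟩)))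
    · exact Or.inr (Or.inr (Or.inr (Or.inr (Or.inl ⟨i, h, e1, e2, e3⟩))))
    · exact Or.inr (Or.inr (Or.inr (Or.inr (Or.inr ⟨i, h, e1, e2, e3⟩))))

-- ===== VERDICT (by name: the statement is the Claim_ definition above) =====
theorem common_subs_3_spec : Claim_equal_common_subs_3 := by
  intro str _
  unfold Spec_common_subs_3
  rw [Bool.eq_iff_iff, A_iff, B_iff]
  constructor
  · rintro ⟨i, h, hm⟩
    exact ⟨i, h, ((bridge _ _ _ (no_space_str str _ (List.getElem_mem _))
      (no_space_str str _ (List.getElem_mem _))).mp hm)⟩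
  · rintro ⟨i, h, hm⟩
    exact ⟨i, h, ((bridge _ _ _ (no_space_str str _ (List.getElem_mem _))
      (no_space_str str _ (List.getElem_mem _))).mpr hm)⟩
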